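-- pv_equiv track=rewrite | github.com/martinsam/dj-blog | blog/utils.py | strip_punctuation
-- ===== SOURCE A (Python) =====
-- import string
--
-- def strip_punctuation(input):
--     """
--     Strip punctuation and words with a length lower than 2 chars
--     """
--
--     exclude = set( string.punctuation )
--
--     # http://stackoverflow.com/questions/265960/best-way-to-strip-punctuation-from-a-string-in-python
--     letters = []
--     for s in input:
--         if s in exclude:
--             letters.append(' ')
--         else:
--             letters.append(s)
--
--     words = ''.join(s for s in letters)
--
--     words_list = words.split()
--
--     # delete words with length < 2 chars
--     filtered_words_list = []
--     for w in words_list: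
--         if w.isdigit() or len(w) > 2:
--             filtered_words_list.append(w)
--
--     return ' '.join(s for s in filtered_words_list)
-- ===== SOURCE B (Python) =====
-- import string
--
-- def strip_punctuation(input):
--     """
--     Strip punctuation and words with a length lower than 2 chars
--     (single-pass tokenizer instead of replace / split / filter passes)
--     """
--     exclude = set(string.punctuation)
--     result = []
--     buf = []
--     for ch in input:
--         if ch in exclude or ch.isspace():
--             if buf:
--                 word = ''.join(buf)
--                 if word.isdigit() or len(word) > 2:
--                     result.append(word)
--                 buf = []
--         else:
--             buf.append(ch)
--     if buf:
--         word = ''.join(buf)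
--         if word.isdigit() or len(word) > 2:
--             result.append(word)
--     return ' '.join(result)
-- ===== Notes on version B (the rewrite author's own statement) =====
-- stated objective: alternative
-- what changed: Replaced the three-pass pipeline (replace punctuation by spaces, join, split, then filter) by a single-pass tokenizer that scans the string once with a word buffer, applying the keep-test at each boundary.
import Mathlib
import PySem

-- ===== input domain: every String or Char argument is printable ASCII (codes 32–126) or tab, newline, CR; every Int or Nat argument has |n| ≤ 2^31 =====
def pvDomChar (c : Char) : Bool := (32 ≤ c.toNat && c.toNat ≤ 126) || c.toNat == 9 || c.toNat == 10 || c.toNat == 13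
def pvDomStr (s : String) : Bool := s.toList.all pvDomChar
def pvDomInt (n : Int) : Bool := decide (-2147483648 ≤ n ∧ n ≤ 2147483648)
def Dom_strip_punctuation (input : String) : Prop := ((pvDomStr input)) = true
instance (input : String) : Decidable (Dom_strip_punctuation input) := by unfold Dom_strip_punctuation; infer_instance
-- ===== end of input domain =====

-- B is a single-pass tokenizer with a word buffer instead of A's replace/join/split/filter pipeline; same results.

-- string.punctuation (shared module constant of both Pythons)
def pvPunct : List Char := "!\"#$%&'()*+,-./:;<=>?@[\\]^_`{|}~".toList

-- the keep-test 'w.isdigit() or len(w) > 2' (identical expression in both Pythons)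
def pvKeep (w : List Char) : Bool := PySem.Chars.strIsdigit w || decide (w.length > 2)

-- ===== PORT A =====
def strip_punctuation (input : String) : String :=
  let exclude : PySem.Set Char := PySem.Set.ofList pvPunct
  let letters : List Char :=
    input.toList.foldl (fun acc s => if PySem.Set.contains exclude s then acc ++ [' '] else acc ++ [s]) []
  let words : List Char := PySem.Chars.join [] (letters.map (fun s => [s]))  -- ''.join(s for s in letters)
  let words_list := PySem.Chars.split₀ words                                 -- words.split()
  let filtered := words_list.foldl (fun acc w => if pvKeep w then acc ++ [w] else acc) []
  String.ofList (PySem.Chars.join [' '] filtered)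

-- ===== PORT B =====
-- the loop of Source B: (result, buf) accumulator, flush at punctuation/space boundaries, final flush
def pvTokGo (exclude : PySem.Set Char) : List Char → List Char → List (List Char) → List (List Char)
  | [], buf, result =>
      if buf.isEmpty then result
      else if pvKeep buf then result ++ [buf] else result
  | ch :: rest, buf, result =>
      if PySem.Set.contains exclude ch || PySem.Chars.isspace ch then
        if buf.isEmpty then pvTokGo exclude rest [] result
        else pvTokGo exclude rest [] (if pvKeep buf then result ++ [buf] else result)
      else pvTokGo exclude rest (buf ++ [ch]) result

def strip_punctuation_alt (input : String) : String :=
  let exclude : PySem.Set Char := PySem.Set.ofList pvPunct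
  String.ofList (PySem.Chars.join [' '] (pvTokGo exclude input.toList [] []))

-- ===== PRECONDITION & SPEC =====
def Spec_strip_punctuation (input : String) (out : String) : Prop := out = strip_punctuation_alt input
instance (input : String) (out : String) : Decidable (Spec_strip_punctuation input out) := by unfold Spec_strip_punctuation; infer_instance

-- ===== CLAIM (what is proved, stated in full; the proofs are below) =====
def Claim_equal_strip_punctuation : Prop := ∀ (input : String), Dom_strip_punctuation input → Spec_strip_punctuation input (strip_punctuation input)

-- ===== LEMMAS AND PROOFS =====

-- A's replacement of punctuation by a space, as a character map
def pvRep (exclude : PySem.Set Char) (c : Char) : Char :=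
  if PySem.Set.contains exclude c then ' ' else c

lemma pvIsspace_rep (exclude : PySem.Set Char) (c : Char) :
    PySem.Chars.isspace (pvRep exclude c) = (PySem.Set.contains exclude c || PySem.Chars.isspace c) := by
  unfold pvRep
  cases PySem.Set.contains exclude c
  · simp only [Bool.false_eq_true, if_false, Bool.false_or]
  · simp only [if_true, Bool.true_or]
    decide

lemma pvSplitGo_acc (s : List Char) : ∀ (cur : List Char) (acc : List (List Char)),
    PySem.Chars.split₀.go s cur acc = acc.reverse ++ PySem.Chars.split₀.go s cur [] := by
  induction s with
  | nil => intro cur acc; simp [PySem.Chars.split₀.go]; split <;> simp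
  | cons c rest ih =>
      intro cur acc
      simp only [PySem.Chars.split₀.go]
      split
      · split
        · exact ih [] acc
        · rw [ih [] (cur.reverse :: acc), ih [] [cur.reverse]]
          simp
      · exact ih (c :: cur) acc

lemma pvTokGo_eq (exclude : PySem.Set Char) (cs : List Char) :
    ∀ (buf : List Char) (res : List (List Char)),
    pvTokGo exclude cs buf res
      = res ++ (PySem.Chars.split₀.go (cs.map (pvRep exclude)) buf.reverse []).filter pvKeep := by
  induction cs with
  | nil =>
      intro buf res
      by_cases hb : buf = []
      · subst hb; simp [pvTokGo, PySem.Chars.split₀.go]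
      · have h : buf.isEmpty = false := by simp [hb]
        have h2 : buf.reverse.isEmpty = false := by simp [hb]
        simp only [pvTokGo, List.map_nil, PySem.Chars.split₀.go, h, h2, Bool.false_eq_true,
          if_false, List.reverse_reverse, List.reverse_nil, List.reverse_cons, List.nil_append]
        cases hk : pvKeep buf <;> simp [hk]
  | cons c rest ih =>
      intro buf res
      simp only [pvTokGo, List.map_cons, PySem.Chars.split₀.go, pvIsspace_rep]
      cases hB : (PySem.Set.contains exclude c || PySem.Chars.isspace c)
      · -- not a boundary: pvRep keeps c
        rcases Bool.or_eq_false_iff.mp hB with ⟨h1, h2⟩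
        have hrep : pvRep exclude c = c := by unfold pvRep; rw [h1]; simp
        simp only [Bool.false_eq_true, if_false]
        rw [ih (buf ++ [c]) res]
        simp [hrep]
      · -- boundary: flush the buffer
        simp only [if_true]
        by_cases hb : buf = []
        · subst hb
          simp only [List.reverse_nil, List.isEmpty_nil, if_true]
          rw [ih [] res]
          simp
        · have h : buf.isEmpty = false := by simp [hb]
          have h2 : buf.reverse.isEmpty = false := by simp [hb]
          simp only [h, h2, Bool.false_eq_true, if_false, List.reverse_reverse]
          rw [pvSplitGo_acc _ [] [buf], ih [] _]
          cases hk : pvKeep buf <;> simp [hk]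

-- ===== VERDICT (by name: the statement is the Claim_ definition above) =====
theorem strip_punctuation_spec : Claim_equal_strip_punctuation := by
  intro input _
  unfold Spec_strip_punctuation strip_punctuation strip_punctuation_alt
  simp only [PySem.List.foldl_append_if_eq_filter]
  rw [pvTokGo_eq]
  congr 1
  -- reduce A's letters loop / join to a map, then both sides are the same split₀.go call
  have hletters :
      input.toList.foldl
        (fun acc s => if PySem.Set.contains (PySem.Set.ofList pvPunct) s then acc ++ [' '] else acc ++ [s]) []
        = input.toList.map (pvRep (PySem.Set.ofList pvPunct)) := by
    have : (fun (acc : List Char) (s : Char) =>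
        if PySem.Set.contains (PySem.Set.ofList pvPunct) s then acc ++ [' '] else acc ++ [s])
        = fun acc s => acc ++ [pvRep (PySem.Set.ofList pvPunct) s] := by
      funext acc s; unfold pvRep; split <;> simp
    rw [this, PySem.List.foldl_append_singleton_eq_map]
    simp
  simp only [hletters, PySem.Chars.join_nil_singletons, PySem.Chars.split₀]
  simp
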